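-- pv_equiv track=rewrite | github.com/pypi-data/pypi-mirror-382 | packages/context-cleaner/context_cleaner-0.3.0.tar.gz/context_cleaner-0.3.0/src/context_cleaner/services/service_orchestrator.py | _calculate_adaptive_timeout
-- ===== SOURCE A (Python) =====
-- from typing import Dict, List, Optional, Any, Callable, Tuple, Awaitable, Union, Sequence, Set
--
-- def _calculate_adaptive_timeout(args: List[str], base_timeout: int) -> int:
--     """Calculate adaptive timeout based on command complexity and system load."""
--     command_str = ' '.join(args).lower()
--
--     # Base timeout adjustments
--     if 'up' in command_str or 'start' in command_str:
--         return max(base_timeout * 2, 30)  # Container startup needs more time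
--     elif 'build' in command_str:
--         return max(base_timeout * 4, 120)  # Image builds need much more time
--     elif 'pull' in command_str:
--         return max(base_timeout * 3, 60)  # Image pulls need more time
--     elif any(check in command_str for check in ['ps', 'inspect', 'logs']):
--         return max(base_timeout // 2, 5)  # Query operations can be faster
--     else:
--         return base_timeout
-- ===== SOURCE B (Python) =====
-- # Per-argument classification instead of joining: each argument is lowered and
-- # classified on its own into a priority class (0..4); the answer comes from the
-- # best (smallest) class over all arguments, looked up in a results table.
-- # Correct because every keyword is space-free, so it occurs in the space-joined
-- # command string iff it occurs inside a single argument.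
-- _RULES = (("up", "start"), ("build",), ("pull",), ("ps", "inspect", "logs"))
--
-- def _classify(arg):
--     """Priority class of one argument: index of the first rule it matches, 4 if none."""
--     a = arg.lower()
--     return next((i for i, kws in enumerate(_RULES) if any(k in a for k in kws)), len(_RULES))
--
-- def _calculate_adaptive_timeout(args, base_timeout):
--     best = min(map(_classify, args), default=len(_RULES))
--     results = (max(base_timeout * 2, 30), max(base_timeout * 4, 120),
--                max(base_timeout * 3, 60), max(base_timeout // 2, 5), base_timeout)
--     return results[best]
-- ===== Notes on version B (the rewrite author's own statement) =====
-- stated objective: alternative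
-- what changed: Instead of joining the arguments into one lowered command string and testing it through an if/elif keyword chain, B classifies each argument independently into a priority class (first matching rule index, 4 if none), takes the minimum class over all arguments, and indexes a precomputed results table; correctness rests on keywords being space-free so a substring of the joined string lies inside a single argument.
import Mathlib
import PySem

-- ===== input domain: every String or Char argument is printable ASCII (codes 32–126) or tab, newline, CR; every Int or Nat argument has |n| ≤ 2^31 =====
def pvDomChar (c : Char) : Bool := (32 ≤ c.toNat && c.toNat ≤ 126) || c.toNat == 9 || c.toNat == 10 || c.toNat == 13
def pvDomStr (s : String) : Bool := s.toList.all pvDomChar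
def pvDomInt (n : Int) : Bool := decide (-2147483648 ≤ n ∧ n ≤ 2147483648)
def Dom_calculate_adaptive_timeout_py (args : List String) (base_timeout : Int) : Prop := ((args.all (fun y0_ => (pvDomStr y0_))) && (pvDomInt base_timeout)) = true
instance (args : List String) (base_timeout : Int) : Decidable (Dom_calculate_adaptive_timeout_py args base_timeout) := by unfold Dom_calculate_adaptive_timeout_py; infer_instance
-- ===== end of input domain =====

-- B classifies each argument independently into a priority class and takes the minimum, instead of A's if/elif chain over the joined command string (alternative decomposition, same cost).


-- ===== PORT A =====
def calculate_adaptive_timeout_py (args : List String) (base_timeout : Int) : Int :=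
  let command_str := PySem.Str.lower (PySem.Str.join " " args)
  if PySem.Str.isIn "up" command_str || PySem.Str.isIn "start" command_str then
    max (base_timeout * 2) 30
  else if PySem.Str.isIn "build" command_str then
    max (base_timeout * 4) 120
  else if PySem.Str.isIn "pull" command_str then
    max (base_timeout * 3) 60
  else if ["ps", "inspect", "logs"].any (fun check => PySem.Str.isIn check command_str) then
    max (PySem.Int.floordiv base_timeout 2) 5
  else
    base_timeout

-- ===== PORT B =====
-- _RULES from Source B
def pvRules : List (List String) := [["up", "start"], ["build"], ["pull"], ["ps", "inspect", "logs"]]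

-- the enumerate/next generator of _classify: index of the first matching rule, i + remaining length if none
def pvClassifyGo (a : String) (i : Nat) : List (List String) → Nat
  | [] => i
  | kws :: rest => if kws.any (fun k => PySem.Str.isIn k a) then i else pvClassifyGo a (i + 1) rest

-- _classify(arg): priority class of one argument
def pvClassify (arg : String) : Nat := pvClassifyGo (PySem.Str.lower arg) 0 pvRules

def calculate_adaptive_timeout_py_alt (args : List String) (base_timeout : Int) : Int :=
  -- min(map(_classify, args), default=len(_RULES)) as a fold of min (every class ≤ the default 4)
  let best := args.foldl (fun m arg => min m (pvClassify arg)) pvRules.length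
  let results : List Int :=
    [max (base_timeout * 2) 30, max (base_timeout * 4) 120,
     max (base_timeout * 3) 60, max (PySem.Int.floordiv base_timeout 2) 5, base_timeout]
  results.getD best base_timeout  -- best ≤ 4 always, so the default is never used

-- ===== PRECONDITION & SPEC =====
def Spec_calculate_adaptive_timeout_py (args : List String) (base_timeout : Int) (out : Int) : Prop := out = calculate_adaptive_timeout_py_alt args base_timeout
instance (args : List String) (base_timeout : Int) (out : Int) : Decidable (Spec_calculate_adaptive_timeout_py args base_timeout out) := by unfold Spec_calculate_adaptive_timeout_py; infer_instance

-- ===== CLAIM (what is proved, stated in full; the proofs are below) =====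
def Claim_equal_calculate_adaptive_timeout_py : Prop := ∀ (args : List String) (base_timeout : Int), Dom_calculate_adaptive_timeout_py args base_timeout → Spec_calculate_adaptive_timeout_py args base_timeout (calculate_adaptive_timeout_py args base_timeout)

-- ===== LEMMAS AND PROOFS =====

-- a space-free pattern is a prefix of a ++ ' ' :: b iff it is a prefix of a
theorem pv_prefix_space (b : List Char) : ∀ (k a : List Char), ' ' ∉ k → (k <+: a ++ ' ' :: b ↔ k <+: a) := by
  intro k
  induction k with
  | nil => simp
  | cons c k ih =>
    intro a hk
    cases a with
    | nil =>
      simp only [List.nil_append, List.cons_prefix_cons]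
      constructor
      · rintro ⟨rfl, -⟩; exact absurd (List.mem_cons_self) hk
      · intro h; exact absurd h (List.cons_ne_nil _ _ ∘ List.prefix_nil.mp)
    | cons d a' =>
      simp only [List.cons_append, List.cons_prefix_cons]
      rw [ih a' (fun h => hk (List.mem_cons_of_mem _ h))]

-- a space-free pattern is an infix of a ++ ' ' :: b iff it is an infix of a or of b
theorem pv_infix_space (b k : List Char) (hk : ' ' ∉ k) : ∀ a, (k <:+: a ++ ' ' :: b ↔ k <:+: a ∨ k <:+: b) := by
  intro a
  induction a with
  | nil =>
    simp only [List.nil_append]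
    rw [List.infix_cons_iff, List.infix_nil]
    constructor
    · rintro (h | h)
      · cases k with
        | nil => exact Or.inl rfl
        | cons c k' =>
          rw [List.cons_prefix_cons] at h
          exact absurd (h.1 ▸ List.mem_cons_self) hk
      · exact Or.inr h
    · rintro (rfl | h)
      · exact Or.inl (List.nil_prefix)
      · exact Or.inr h
  | cons c a' ih =>
    rw [List.cons_append, List.infix_cons_iff, List.infix_cons_iff,
        show (c :: (a' ++ ' ' :: b)) = (c :: a') ++ ' ' :: b from rfl,
        pv_prefix_space b k (c :: a') hk, ih]
    tauto

-- a nonempty space-free pattern is an infix of ' '.join(ls) iff it is an infix of some element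
theorem pv_infix_join (k : List Char) (hk : ' ' ∉ k) (hne : k ≠ []) :
    ∀ ls : List (List Char), (k <:+: PySem.Chars.join [' '] ls ↔ ∃ l ∈ ls, k <:+: l) := by
  intro ls
  induction ls with
  | nil => simp [PySem.Chars.join_nil, List.infix_nil, hne]
  | cons x rest ih =>
    cases rest with
    | nil => simp [PySem.Chars.join_singleton]
    | cons y r =>
      rw [PySem.Chars.join_cons_cons]
      rw [show x ++ [' '] ++ PySem.Chars.join [' '] (y :: r) = x ++ ' ' :: PySem.Chars.join [' '] (y :: r) by simp]
      rw [pv_infix_space _ k hk x, ih]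
      simp

-- lower distributes over the space-join
theorem pv_lower_join : ∀ ls : List (List Char),
    PySem.Chars.lower (PySem.Chars.join [' '] ls) = PySem.Chars.join [' '] (ls.map PySem.Chars.lower) := by
  intro ls
  induction ls with
  | nil => simp [PySem.Chars.join_nil, PySem.Chars.lower]
  | cons x rest ih =>
    cases rest with
    | nil => simp [PySem.Chars.join_singleton]
    | cons y r =>
      rw [PySem.Chars.join_cons_cons]
      simp only [List.map_cons] at ih ⊢
      rw [PySem.Chars.join_cons_cons, ← ih]
      simp [PySem.Chars.lower, show PySem.Chars.lowerChar ' ' = ' ' from by decide]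

-- a nonempty space-free keyword occurs in the lowered joined command iff it occurs in some lowered argument
theorem pv_key_any (k : String) (hk : ' ' ∉ k.toList) (hne : k.toList ≠ []) (args : List String) :
    PySem.Str.isIn k (PySem.Str.lower (PySem.Str.join " " args))
      = args.any (fun a => PySem.Str.isIn k (PySem.Str.lower a)) := by
  rw [Bool.eq_iff_iff]
  simp only [PySem.Str.isIn_eq, PySem.Str.toList_lower, PySem.Str.toList_join, List.any_eq_true]
  rw [show (" " : String).toList = [' '] from rfl, pv_lower_join, List.map_map,
      PySem.Chars.isIn_iff_infix, pv_infix_join k.toList hk hne]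
  constructor
  · rintro ⟨l, hl, h⟩
    obtain ⟨a, ha, rfl⟩ := List.mem_map.mp hl
    exact ⟨a, ha, (PySem.Chars.isIn_iff_infix _ _).mpr h⟩
  · rintro ⟨a, ha, h⟩
    exact ⟨_, List.mem_map.mpr ⟨a, ha, rfl⟩, (PySem.Chars.isIn_iff_infix _ _).mp h⟩

-- any distributes over a pointwise || of predicates
theorem pv_any_or {α : Type} (l : List α) (f g : α → Bool) :
    l.any (fun x => f x || g x) = (l.any f || l.any g) := by
  induction l with
  | nil => simp
  | cons x r ih => cases hf : f x <;> cases hg : g x <;> simp [hf, hg, ih]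

-- the per-argument class, written as the four tests in priority order
theorem pv_classify_eq (a : String) :
    pvClassify a =
      (if PySem.Str.isIn "up" (PySem.Str.lower a) || PySem.Str.isIn "start" (PySem.Str.lower a) then 0
       else if PySem.Str.isIn "build" (PySem.Str.lower a) then 1
       else if PySem.Str.isIn "pull" (PySem.Str.lower a) then 2
       else if PySem.Str.isIn "ps" (PySem.Str.lower a) || PySem.Str.isIn "inspect" (PySem.Str.lower a) || PySem.Str.isIn "logs" (PySem.Str.lower a) then 3
       else 4) := by
  simp [pvClassify, pvRules, pvClassifyGo, Bool.or_assoc]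

-- one step of the min-fold, purely on the priority encodings
theorem pv_min_step (p0 p1 p2 p3 q0 q1 q2 q3 : Bool) (c : Nat) :
    min (min c (if p0 then 0 else if p1 then 1 else if p2 then 2 else if p3 then 3 else 4))
        (if q0 then 0 else if q1 then 1 else if q2 then 2 else if q3 then 3 else 4)
      = min c (if p0 || q0 then 0 else if p1 || q1 then 1 else if p2 || q2 then 2 else if p3 || q3 then 3 else 4) := by
  rw [min_assoc]
  congr 1
  revert p0 p1 p2 p3 q0 q1 q2 q3
  decide

-- the fold of min computes the first priority class matched by any argument
theorem pv_fold_char (args : List String) : ∀ c : Nat, c ≤ 4 →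
    args.foldl (fun m arg => min m (pvClassify arg)) c =
      min c
       (if args.any (fun a => PySem.Str.isIn "up" (PySem.Str.lower a) || PySem.Str.isIn "start" (PySem.Str.lower a)) then 0
        else if args.any (fun a => PySem.Str.isIn "build" (PySem.Str.lower a)) then 1
        else if args.any (fun a => PySem.Str.isIn "pull" (PySem.Str.lower a)) then 2
        else if args.any (fun a => PySem.Str.isIn "ps" (PySem.Str.lower a) || PySem.Str.isIn "inspect" (PySem.Str.lower a) || PySem.Str.isIn "logs" (PySem.Str.lower a)) then 3
        else 4) := by
  induction args with
  | nil => intro c hc; simp; omega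
  | cons a rest ih =>
    intro c hc
    rw [List.foldl_cons, ih (min c (pvClassify a)) (le_trans (min_le_left _ _) hc), pv_classify_eq a]
    simp only [List.any_cons]
    exact pv_min_step _ _ _ _ _ _ _ _ c

-- ===== VERDICT (by name: the statement is the Claim_ definition above) =====
theorem calculate_adaptive_timeout_py_spec : Claim_equal_calculate_adaptive_timeout_py := by
  intro args base_timeout _
  unfold Spec_calculate_adaptive_timeout_py
  simp only [calculate_adaptive_timeout_py, calculate_adaptive_timeout_py_alt]
  simp only [pv_key_any "up" (by decide) (by decide), pv_key_any "start" (by decide) (by decide),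
    pv_key_any "build" (by decide) (by decide), pv_key_any "pull" (by decide) (by decide),
    List.any_cons, List.any_nil, Bool.or_false]
  simp only [pv_key_any "ps" (by decide) (by decide), pv_key_any "inspect" (by decide) (by decide),
    pv_key_any "logs" (by decide) (by decide)]
  rw [show pvRules.length = 4 from rfl, pv_fold_char args 4 (le_refl 4)]
  simp only [pv_any_or, Bool.or_assoc]
  split_ifs <;> simp [List.getD]
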